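-- pv_equiv track=rewrite | github.com/jameschoi112/weverse_signup_automation | src/services/email_generator.py | _pattern_front_heavy
-- ===== SOURCE A (Python) =====
-- from typing import Set, List
--
-- def _pattern_front_heavy(chars: List[str]) -> str:
--     """앞쪽에 많은 dot"""
--     result = [chars[0]]
--     middle = len(chars) // 2
--     for i in range(1, len(chars)):
--         if i <= middle:
--             result.append('.')
--         result.append(chars[i])
--     return ''.join(result)
-- ===== SOURCE B (Python) =====
-- from typing import Set, List
--
-- def _pattern_front_heavy(chars: List[str]) -> str:
--     """앞쪽에 많은 dot"""
--     head = chars[0]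
--     middle = len(chars) // 2
--     return '.'.join([head] + chars[1:middle + 1]) + ''.join(chars[middle + 1:])
-- ===== Notes on version B (the rewrite author's own statement) =====
-- stated objective: idiomatic
-- what changed: Replaces the index loop with its per-iteration conditional dot append by two slices and str.join: the front half (including the head) is '.'-joined so the separator supplies the dots, the back half is plainly concatenated.
import Mathlib
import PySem

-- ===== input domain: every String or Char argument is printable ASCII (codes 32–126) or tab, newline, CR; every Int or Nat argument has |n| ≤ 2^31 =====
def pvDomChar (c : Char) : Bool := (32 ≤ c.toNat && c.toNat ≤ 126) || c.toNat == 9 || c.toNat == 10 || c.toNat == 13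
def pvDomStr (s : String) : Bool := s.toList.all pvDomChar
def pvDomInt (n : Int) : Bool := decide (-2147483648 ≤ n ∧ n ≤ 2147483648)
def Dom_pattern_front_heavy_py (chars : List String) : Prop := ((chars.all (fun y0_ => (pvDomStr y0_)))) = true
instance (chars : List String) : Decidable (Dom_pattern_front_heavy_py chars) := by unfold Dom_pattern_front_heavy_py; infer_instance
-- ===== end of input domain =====

-- B replaces A's index loop with its per-iteration conditional dot append by two slices plus str.join; objective: idiomatic (no speed claim).

-- ===== PORT A =====
-- literal transliteration of _pattern_front_heavy: result list built by an index loop, then ''.join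
def pattern_front_heavy_py (chars : List String) : String :=
  let result : List String := [PySem.List.pyGetD chars 0 ""]   -- chars[0]; the IndexError on [] is excluded by Pre_
  let middle : Int := PySem.Int.floordiv (PySem.List.len chars) 2
  let result := (PySem.List.pyRange 1 (PySem.List.len chars)).foldl
    (fun acc i => (if i ≤ middle then acc ++ ["."] else acc) ++ [PySem.List.pyGetD chars i ""]) result
  PySem.Str.join "" result

-- ===== PORT B =====
-- literal transliteration of B: '.'.join([head] + chars[1:middle+1]) + ''.join(chars[middle+1:])
def pattern_front_heavy_py_alt (chars : List String) : String :=
  let head : String := PySem.List.pyGetD chars 0 ""            -- chars[0]; the IndexError on [] is excluded by Pre_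
  let middle : Int := PySem.Int.floordiv (PySem.List.len chars) 2
  PySem.Str.join "." ([head] ++ PySem.List.slice chars (some 1) (some (middle + 1)))
    ++ PySem.Str.join "" (PySem.List.slice chars (some (middle + 1)) none)

-- ===== PRECONDITION & SPEC =====
-- A raises IndexError on the empty list (chars[0]); B raises there too.
def Pre_pattern_front_heavy_py (chars : List String) : Prop := chars ≠ []
instance (chars : List String) : Decidable (Pre_pattern_front_heavy_py chars) := by unfold Pre_pattern_front_heavy_py; infer_instance
def pvWitness_pattern_front_heavy_py : List String := (["a", "b", "c"])

def Spec_pattern_front_heavy_py (chars : List String) (out : String) : Prop := out = pattern_front_heavy_py_alt chars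
instance (chars : List String) (out : String) : Decidable (Spec_pattern_front_heavy_py chars out) := by unfold Spec_pattern_front_heavy_py; infer_instance

-- ===== CLAIM (what is proved, stated in full; the proofs are below) =====
def Claim_equal_pattern_front_heavy_py : Prop := ∀ (chars : List String), Dom_pattern_front_heavy_py chars → Pre_pattern_front_heavy_py chars → Spec_pattern_front_heavy_py chars (pattern_front_heavy_py chars)

-- ===== LEMMAS AND PROOFS =====

theorem join_nil_eq_flatten (ls : List (List Char)) : PySem.Chars.join [] ls = ls.flatten := by
  match ls with
  | [] => simp [PySem.Chars.join_nil]
  | [p] => simp [PySem.Chars.join_singleton]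
  | p :: q :: rest =>
      rw [PySem.Chars.join_cons_cons]
      simp [join_nil_eq_flatten (q :: rest)]

theorem join_cons_eq_flatMap (sep p : List Char) (ps : List (List Char)) :
    PySem.Chars.join sep (p :: ps) = p ++ ps.flatMap (fun q => sep ++ q) := by
  induction ps generalizing p with
  | nil => simp [PySem.Chars.join_singleton]
  | cons q rest ih =>
      rw [PySem.Chars.join_cons_cons, ih q]
      simp

theorem join_split (c : String) (F D : List String) :
    PySem.Str.join "" ([c] ++ (F.flatMap (fun s => ["."] ++ [s]) ++ D))
      = PySem.Str.join "." ([c] ++ F) ++ PySem.Str.join "" D := by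
  refine String.toList_inj.mp ?_
  simp [PySem.Str.toList_join, String.toList_append, join_nil_eq_flatten,
    join_cons_eq_flatMap, List.flatMap_def]
  induction F <;> simp_all [Function.comp_def]

theorem foldA_eq_flatMap (m : Int) (g : Int → String) (l : List Int) (acc : List String) :
    l.foldl (fun acc i => (if i ≤ m then acc ++ ["."] else acc) ++ [g i]) acc
      = acc ++ l.flatMap (fun i => (if i ≤ m then ["."] else []) ++ [g i]) := by
  induction l generalizing acc with
  | nil => simp
  | cons x xs ih => by_cases h : x ≤ m <;> simp [ih, h]

theorem main_eq (c : String) (rest : List String) :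
    pattern_front_heavy_py (c :: rest) = pattern_front_heavy_py_alt (c :: rest) := by
  set chars := c :: rest with hchars
  set k : Nat := (rest.length + 1) / 2 with hk
  have hklen : k ≤ rest.length := by omega
  have hlen : PySem.List.len chars = ((rest.length + 1 : Nat) : Int) := by
    simp [PySem.List.len_eq, hchars]
  have hmid : PySem.Int.floordiv (PySem.List.len chars) 2 = (k : Int) := by
    rw [hlen]
    exact_mod_cast PySem.Int.floordiv_natCast (rest.length + 1) 2
  set g : Int → String := fun i => PySem.List.pyGetD chars i "" with hg
  have hfull : (PySem.List.pyRange 1 (PySem.List.len chars)).map g = rest := by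
    rw [hg]
    rw [PySem.List.map_pyGetD_pyRange chars "" (by norm_num)]
    simp [hchars]
  have hsplit : PySem.List.pyRange 1 (PySem.List.len chars)
      = PySem.List.pyRange 1 ((k : Int) + 1) ++ PySem.List.pyRange ((k : Int) + 1) (PySem.List.len chars) := by
    refine PySem.List.pyRange_one_append 1 ((k : Int) + 1) _ (by omega) ?_
    rw [hlen]; push_cast; omega
  have hlen1 : ((PySem.List.pyRange 1 ((k : Int) + 1)).map g).length = k := by
    simp [PySem.List.length_pyRange_one]
  have htake : (PySem.List.pyRange 1 ((k : Int) + 1)).map g = rest.take k := by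
    have := hfull
    rw [hsplit, List.map_append] at this
    rw [← this, List.take_left' hlen1]
  have hdrop : (PySem.List.pyRange ((k : Int) + 1) (PySem.List.len chars)).map g = rest.drop k := by
    have := hfull
    rw [hsplit, List.map_append] at this
    rw [← this, List.drop_left' hlen1]
  -- A side
  have hA : pattern_front_heavy_py chars
      = PySem.Str.join "" ([c] ++ ((rest.take k).flatMap (fun s => ["."] ++ [s]) ++ rest.drop k)) := by
    show PySem.Str.join "" _ = _
    rw [hmid]
    have h0 : PySem.List.pyGetD chars 0 "" = c := by
      rw [hchars]; exact PySem.List.pyGetD_zero_cons c rest ""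
    have h1 : (PySem.List.pyRange 1 ((k : Int) + 1)).flatMap
        (fun i => (if i ≤ (k : Int) then ["."] else []) ++ [g i])
        = (rest.take k).flatMap (fun s => ["."] ++ [s]) := by
      rw [← htake, List.flatMap_map]
      refine List.flatMap_congr (fun x hx => ?_)
      have := (PySem.List.mem_pyRange_one).mp hx
      simp [show x ≤ (k : Int) by omega]
    have h2 : (PySem.List.pyRange ((k : Int) + 1) (PySem.List.len chars)).flatMap
        (fun i => (if i ≤ (k : Int) then ["."] else []) ++ [g i])
        = rest.drop k := by
      rw [← hdrop]
      rw [List.flatMap_congr (g := fun i => [g i]) (fun x hx => by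
        have := (PySem.List.mem_pyRange_one).mp hx
        simp [show ¬ x ≤ (k : Int) by omega])]
      exact (List.map_eq_flatMap ..).symm
    rw [h0, foldA_eq_flatMap, hsplit, List.flatMap_append, h1, h2]
  -- B side
  have hB : pattern_front_heavy_py_alt chars
      = PySem.Str.join "." ([c] ++ rest.take k) ++ PySem.Str.join "" (rest.drop k) := by
    show PySem.Str.join "." _ ++ PySem.Str.join "" _ = _
    rw [hmid]
    have h0 : PySem.List.pyGetD chars 0 "" = c := by
      rw [hchars]; exact PySem.List.pyGetD_zero_cons c rest ""
    have hkcast : (k : Int) + 1 = ((k + 1 : Nat) : Int) := by push_cast; ring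
    rw [h0, hkcast, show (1:Int) = ((1:Nat):Int) from rfl,
      PySem.List.slice_natCast chars 1 (k+1), PySem.List.slice_from_natCast chars (k+1)]
    simp [hchars]
  rw [hA, hB, join_split]

-- ===== VERDICT (by name: the statement is the Claim_ definition above) =====
theorem pattern_front_heavy_py_spec : Claim_equal_pattern_front_heavy_py := by
  intro chars _ hne
  unfold Spec_pattern_front_heavy_py
  obtain ⟨c, rest, rfl⟩ := List.exists_cons_of_ne_nil hne
  exact main_eq c rest
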